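-- pv_equiv track=rewrite | github.com/AlbertoIchikawa/2020_training_Ichikawa | HeadFirstPython/string_splosion problem/max_span.py | max_span
-- ===== SOURCE A (Python) =====
-- def max_span(data_list):
--     max_value = 0
--     # 配列の中の番号種類の取得
--     num_list = set(data_list)
--
--     # 次にそれぞれの番号のインデックス値を取得してresultに入れる。
--     # それぞれの数字のインデックス値を使ってspanの計算（最後のインデックス値から最初のインデックス値を引いて＋１するとspanがわかる。）
--     for num in num_list:
--         result = [i for i, e in enumerate(data_list) if e == num]
--         if result[-1] - result[0] + 1 > max_value:
--             max_value = result[-1] - result[0] + 1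
--
--     return max_value
-- ===== SOURCE B (Python) =====
-- def max_span(data_list):
--     max_value = 0
--     n = len(data_list)
--     for i in range(n):
--         for j in range(n - 1, i - 1, -1):
--             if data_list[j] == data_list[i]:
--                 span = j - i + 1
--                 if span > max_value:
--                     max_value = span
--                 break
--     return max_value
-- ===== Notes on version B (the rewrite author's own statement) =====
-- stated objective: idiomatic
-- what changed: Replaced A's per-distinct-value pass (set(data_list) plus an index-list comprehension scanning the whole list for each value) by the classic position-based inward scan: for each start index i, scan from the right for the matching end index and take j-i+1; no set and no per-value index lists are built.
import Mathlib
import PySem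

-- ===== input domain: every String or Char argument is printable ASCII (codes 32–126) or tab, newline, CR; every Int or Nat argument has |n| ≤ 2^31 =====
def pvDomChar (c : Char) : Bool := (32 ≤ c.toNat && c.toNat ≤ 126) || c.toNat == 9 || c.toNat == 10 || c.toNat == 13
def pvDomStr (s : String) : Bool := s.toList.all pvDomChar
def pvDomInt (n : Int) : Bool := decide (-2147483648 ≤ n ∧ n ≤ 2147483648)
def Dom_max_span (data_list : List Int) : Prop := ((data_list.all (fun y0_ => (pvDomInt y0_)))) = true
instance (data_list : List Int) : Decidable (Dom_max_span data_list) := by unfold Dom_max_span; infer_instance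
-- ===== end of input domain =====

-- B replaces A's per-distinct-value index-list pass by the classic position-based
-- inward scan (for each start index, scan from the right for the matching end index).

-- ===== PORT A =====
-- A iterates 'for num in set(data_list)'; the loop only updates a running max, so the
-- result is independent of the set's iteration order and PySem.Set.ofList order is exact.
def max_span (data_list : List Int) : Int :=
  let num_list := PySem.Set.ofList data_list
  num_list.foldl
    (fun max_value num =>
      let result := ((PySem.List.enumerate data_list 0).filter (fun p => p.2 == num)).map (fun p => p.1)
      -- result is nonempty for every num in set(data_list), so result[-1] / result[0]
      -- never raise; the .getD 0 default is unreachable.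
      let last := (PySem.List.pyGet? result (-1)).getD 0
      let first := (PySem.List.pyGet? result 0).getD 0
      if last - first + 1 > max_value then last - first + 1 else max_value)
    0

-- ===== PORT B =====
-- inner 'for j in range(n-1, i-1, -1): if data_list[j] == data_list[i]: …; break'
-- (indices i, j are always in range, so pyGetD's default is unreachable — exact).
def max_span_scan (data_list : List Int) (i max_value : Int) : List Int → Int
  | [] => max_value
  | j :: js =>
    if PySem.List.pyGetD data_list j 0 = PySem.List.pyGetD data_list i 0 then
      let span := j - i + 1
      if span > max_value then span else max_value
    else max_span_scan data_list i max_value js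

def max_span_alt (data_list : List Int) : Int :=
  let n : Int := data_list.length
  (PySem.List.pyRange 0 n 1).foldl
    (fun max_value i => max_span_scan data_list i max_value (PySem.List.pyRange (n - 1) (i - 1) (-1)))
    0

-- ===== PRECONDITION & SPEC =====
def Spec_max_span (data_list : List Int) (out : Int) : Prop := out = max_span_alt data_list
instance (data_list : List Int) (out : Int) : Decidable (Spec_max_span data_list out) := by unfold Spec_max_span; infer_instance

-- ===== CLAIM (what is proved, stated in full; the proofs are below) =====
def Claim_equal_max_span : Prop := ∀ (data_list : List Int), Dom_max_span data_list → Spec_max_span data_list (max_span data_list)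

-- ===== LEMMAS AND PROOFS =====

-- indices (as Python ints) at which data_list holds the value v, in increasing order:
-- exactly A's 'result' list
def pvOcc (l : List Int) (v : Int) : List Int :=
  ((PySem.List.enumerate l 0).filter (fun p => p.2 == v)).map (fun p => p.1)

def pvFirst (l : List Int) (v : Int) : Int := (pvOcc l v).head?.getD 0
def pvLast (l : List Int) (v : Int) : Int := (pvOcc l v).getLast?.getD 0

lemma pvOcc_mem (l : List Int) (v x : Int) :
    x ∈ pvOcc l v ↔ ∃ k : Nat, ∃ h : k < l.length, x = (k : Int) ∧ l[k] = v := by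
  unfold pvOcc
  simp only [List.mem_map, List.mem_filter, PySem.List.mem_enumerate_iff]
  constructor
  · rintro ⟨p, ⟨⟨k, h, rfl⟩, hv⟩, rfl⟩
    exact ⟨k, h, by simp, by simpa using hv⟩
  · rintro ⟨k, h, rfl, hv⟩
    exact ⟨((k : Int), v), ⟨⟨k, h, by simp [hv]⟩, by simp⟩, rfl⟩

lemma pvOcc_pairwise (l : List Int) (v : Int) : (pvOcc l v).Pairwise (· < ·) := by
  unfold pvOcc
  exact List.Pairwise.map _ (fun {a b} h => h)
    ((PySem.List.pairwise_lt_enumerate l 0).filter _)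

lemma pvOcc_ne_nil {l : List Int} {v : Int} {k : Nat} (h : k < l.length) (hv : l[k] = v) :
    pvOcc l v ≠ [] := by
  have : (k : Int) ∈ pvOcc l v := (pvOcc_mem l v k).mpr ⟨k, h, rfl, hv⟩
  exact List.ne_nil_of_mem this

lemma pv_head_le {xs : List Int} (h : xs.Pairwise (· < ·)) {x : Int} (hx : x ∈ xs) :
    xs.head?.getD 0 ≤ x := by
  cases xs with
  | nil => cases hx
  | cons a t =>
    rcases List.mem_cons.mp hx with rfl | ht
    · simp
    · simpa using ((List.pairwise_cons.mp h).1 x ht).le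


lemma pv_le_getLast {xs : List Int} (h : xs.Pairwise (· < ·)) {x : Int} (hx : x ∈ xs) :
    x ≤ xs.getLast?.getD 0 := by
  induction xs generalizing x with
  | nil => cases hx
  | cons a t ih =>
    cases t with
    | nil => simp_all
    | cons b u =>
      rw [List.getLast?_cons_cons]
      have h2 := (List.pairwise_cons.mp h).2
      rcases List.mem_cons.mp hx with rfl | ht
      · have hb : x < b := (List.pairwise_cons.mp h).1 b (by simp)
        exact le_trans hb.le (ih h2 (by simp))
      · exact ih h2 ht

lemma pv_head_mem {xs : List Int} (h : xs ≠ []) : xs.head?.getD 0 ∈ xs := by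
  cases xs <;> simp_all

lemma pv_getLast_mem {xs : List Int} (h : xs ≠ []) : xs.getLast?.getD 0 ∈ xs := by
  rw [List.getLast?_eq_some_getLast h]; simp [List.getLast_mem]

lemma pv_if_max (a t : Int) : (if t > a then t else a) = max a t := by omega

lemma pvGet_neg_one {xs : List Int} (h : xs ≠ []) : PySem.List.pyGet? xs (-1) = xs.getLast? := by
  have h1 : 1 ≤ xs.length := List.length_pos_iff.mpr h
  simp [PySem.List.pyGet?, PySem.List.pyIdx?, h1, List.getLast?_eq_getElem?]

lemma pvGet_zero (xs : List Int) : PySem.List.pyGet? xs 0 = xs.head? := by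
  cases xs <;> simp [PySem.List.pyGet?, PySem.List.pyIdx?]

-- A's fold body, rewritten: for num ∈ data_list the step is a running max of
-- pvLast - pvFirst + 1
lemma pvA_step (l : List Int) (num mv : Int) (hnum : num ∈ l) :
    (let result := ((PySem.List.enumerate l 0).filter (fun p => p.2 == num)).map (fun p => p.1)
     let last := (PySem.List.pyGet? result (-1)).getD 0
     let first := (PySem.List.pyGet? result 0).getD 0
     if last - first + 1 > mv then last - first + 1 else mv)
    = max mv (pvLast l num - pvFirst l num + 1) := by
  obtain ⟨k, hk, hv⟩ := List.mem_iff_getElem.mp hnum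
  have hne : pvOcc l num ≠ [] := pvOcc_ne_nil hk hv
  show (if _ > mv then _ else mv) = _
  rw [show ((PySem.List.enumerate l 0).filter (fun p => p.2 == num)).map (fun p => p.1) = pvOcc l num from rfl]
  rw [pvGet_neg_one hne, pvGet_zero]
  exact pv_if_max mv (pvLast l num - pvFirst l num + 1)

-- breaking inner scan: the first match wins
lemma pv_scan_first (l : List Int) (i mv : Int) (js₁ : List Int) (j : Int) (js₂ : List Int)
    (h1 : ∀ x ∈ js₁, PySem.List.pyGetD l x 0 ≠ PySem.List.pyGetD l i 0)
    (h2 : PySem.List.pyGetD l j 0 = PySem.List.pyGetD l i 0) :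
    max_span_scan l i mv (js₁ ++ j :: js₂) = max mv (j - i + 1) := by
  induction js₁ with
  | nil =>
    simp [max_span_scan, h2]
    omega
  | cons a t ih =>
    have ha := h1 a (by simp)
    simp only [List.cons_append, max_span_scan, if_neg ha]
    exact ih (fun x hx => h1 x (by simp [hx]))

-- the inner loop for start index i finds exactly the last occurrence of l[i]
lemma pv_scan_eq (l : List Int) (k : Nat) (hk : k < l.length) (mv : Int) :
    max_span_scan l (k : Int) mv (PySem.List.pyRange ((l.length : Int) - 1) ((k : Int) - 1) (-1))
      = max mv (pvLast l l[k] - (k : Int) + 1) := by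
  set v := l[k] with hv
  have hkocc : (k : Int) ∈ pvOcc l v := (pvOcc_mem l v k).mpr ⟨k, hk, rfl, rfl⟩
  have hne : pvOcc l v ≠ [] := List.ne_nil_of_mem hkocc
  have hJmem : pvLast l v ∈ pvOcc l v := pv_getLast_mem hne
  obtain ⟨m, hm, hmeq, hmv⟩ := (pvOcc_mem l v (pvLast l v)).mp hJmem
  have hkJ : (k : Int) ≤ pvLast l v := pv_le_getLast (pvOcc_pairwise l v) hkocc
  have hJn : pvLast l v < (l.length : Int) := by
    rw [hmeq]; exact_mod_cast hm
  -- pyGetD at i = k gives v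
  have hgi : PySem.List.pyGetD l (k : Int) 0 = v := by
    rw [PySem.List.pyGetD_eq_getElem l 0 (by positivity) (by exact_mod_cast hk)]
    simp
    exact hv.symm
  -- decompose the countdown range around pvLast l v
  have hrange : PySem.List.pyRange ((l.length : Int) - 1) ((k : Int) - 1) (-1)
      = (PySem.List.pyRange (pvLast l v + 1) (l.length : Int) 1).reverse
        ++ pvLast l v :: (PySem.List.pyRange (k : Int) (pvLast l v) 1).reverse := by
    rw [PySem.List.pyRange_neg_one_eq_reverse]
    have e1 : (k : Int) - 1 + 1 = (k : Int) := by ring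
    have e2 : (l.length : Int) - 1 + 1 = (l.length : Int) := by ring
    rw [e1, e2]
    rw [PySem.List.pyRange_one_append (k : Int) (pvLast l v + 1) (l.length : Int)
        (by omega) (by omega),
      PySem.List.pyRange_one_succ_right hkJ]
    simp
  rw [hrange]
  apply pv_scan_first
  · intro x hx
    have hx' : x ∈ PySem.List.pyRange (pvLast l v + 1) (l.length : Int) 1 := by
      simpa using hx
    obtain ⟨hx1, hx2⟩ := PySem.List.mem_pyRange_one.mp hx'
    intro hcontra
    rw [hgi] at hcontra
    have hx0 : 0 ≤ x := by omega
    have hgx : PySem.List.pyGetD l x 0 = l[x.toNat] :=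
      PySem.List.pyGetD_eq_getElem l 0 hx0 hx2
    have hxmem : x ∈ pvOcc l v := by
      refine (pvOcc_mem l v x).mpr ⟨x.toNat, ?_, by omega, ?_⟩
      · omega
      · rw [← hgx, hcontra]
    have hle : x ≤ pvLast l v := pv_le_getLast (pvOcc_pairwise l v) hxmem
    omega
  · have hgJ : PySem.List.pyGetD l (pvLast l v) 0 = v := by
      have h0 : 0 ≤ pvLast l v := by omega
      rw [hmeq]
      rw [PySem.List.pyGetD_eq_getElem l 0 (by positivity) (by exact_mod_cast hm)]
      simpa using hmv
    rw [hgJ, hgi]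

-- upper bound for a running max
lemma pv_foldl_max_le {β : Type} (xs : List β) (f : β → Int) (init c : Int)
    (h0 : init ≤ c) (h : ∀ x ∈ xs, f x ≤ c) :
    xs.foldl (fun acc y => max acc (f y)) init ≤ c := by
  induction xs generalizing init with
  | nil => simpa using h0
  | cons a t ih =>
    simp only [List.foldl_cons]
    exact ih _ (max_le h0 (h a (by simp))) (fun x hx => h x (by simp [hx]))

-- ===== VERDICT (by name: the statement is the Claim_ definition above) =====
theorem max_span_spec : Claim_equal_max_span := by
  intro l _
  unfold Spec_max_span max_span max_span_alt
  simp only []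
  -- rewrite both folds into running-max form
  have hA : (PySem.Set.ofList l).foldl
      (fun max_value num =>
        let result := ((PySem.List.enumerate l 0).filter (fun p => p.2 == num)).map (fun p => p.1)
        let last := (PySem.List.pyGet? result (-1)).getD 0
        let first := (PySem.List.pyGet? result 0).getD 0
        if last - first + 1 > max_value then last - first + 1 else max_value) 0
      = (PySem.Set.ofList l).foldl
          (fun acc num => max acc (pvLast l num - pvFirst l num + 1)) 0 := by
    apply PySem.List.foldl_congr_mem
    intro acc num hnum
    exact pvA_step l num acc ((PySem.Set.mem_ofList l num).mp hnum)
  have hB : (PySem.List.pyRange 0 (l.length : Int) 1).foldl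
      (fun max_value i => max_span_scan l i max_value
        (PySem.List.pyRange ((l.length : Int) - 1) (i - 1) (-1))) 0
      = (PySem.List.pyRange 0 (l.length : Int) 1).foldl
          (fun acc i => max acc (pvLast l (PySem.List.pyGetD l i 0) - i + 1)) 0 := by
    apply PySem.List.foldl_congr_mem
    intro acc i hi
    obtain ⟨hi0, hin⟩ := PySem.List.mem_pyRange_one.mp hi
    have hk : i.toNat < l.length := by omega
    have hgi : PySem.List.pyGetD l i 0 = l[i.toNat] :=
      PySem.List.pyGetD_eq_getElem l 0 hi0 hin
    have h := pv_scan_eq l i.toNat hk acc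
    rw [show ((i.toNat : Nat) : Int) = i from by omega] at h
    rw [hgi]
    exact h
  rw [hA, hB]
  -- antisymmetry via mutual domination
  set FA := (PySem.Set.ofList l).foldl
      (fun acc num => max acc (pvLast l num - pvFirst l num + 1)) 0 with hFA
  set FB := (PySem.List.pyRange 0 (l.length : Int) 1).foldl
      (fun acc i => max acc (pvLast l (PySem.List.pyGetD l i 0) - i + 1)) 0 with hFB
  have hBounds := PySem.List.le_foldl_max_int (PySem.Set.ofList l)
      (fun num => pvLast l num - pvFirst l num + 1) 0
  have hBoundsB := PySem.List.le_foldl_max_int (PySem.List.pyRange 0 (l.length : Int) 1)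
      (fun i => pvLast l (PySem.List.pyGetD l i 0) - i + 1) 0
  apply le_antisymm
  · -- FA ≤ FB
    apply pv_foldl_max_le _ _ _ _ hBoundsB.1
    intro v hv
    have hvl : v ∈ l := (PySem.Set.mem_ofList l v).mp hv
    obtain ⟨k, hk, hkv⟩ := List.mem_iff_getElem.mp hvl
    have hne : pvOcc l v ≠ [] := pvOcc_ne_nil hk hkv
    have hFmem : pvFirst l v ∈ pvOcc l v := pv_head_mem hne
    obtain ⟨m, hm, hmeq, hmv⟩ := (pvOcc_mem l v (pvFirst l v)).mp hFmem
    have hmem : pvFirst l v ∈ PySem.List.pyRange 0 (l.length : Int) 1 := by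
      apply PySem.List.mem_pyRange_one.mpr
      constructor
      · rw [hmeq]; positivity
      · rw [hmeq]; exact_mod_cast hm
    have := hBoundsB.2 (pvFirst l v) hmem
    have hg : PySem.List.pyGetD l (pvFirst l v) 0 = v := by
      rw [hmeq]
      rw [PySem.List.pyGetD_eq_getElem l 0 (by positivity) (by exact_mod_cast hm)]
      simpa using hmv
    rw [hg] at this
    exact this
  · -- FB ≤ FA
    apply pv_foldl_max_le _ _ _ _ hBounds.1
    intro i hi
    obtain ⟨hi0, hin⟩ := PySem.List.mem_pyRange_one.mp hi
    have hk : i.toNat < l.length := by omega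
    have hgi : PySem.List.pyGetD l i 0 = l[i.toNat] :=
      PySem.List.pyGetD_eq_getElem l 0 hi0 hin
    set v := l[i.toNat] with hv
    have hvset : v ∈ PySem.Set.ofList l :=
      (PySem.Set.mem_ofList l v).mpr (List.getElem_mem hk)
    have hiocc : i ∈ pvOcc l v := by
      refine (pvOcc_mem l v i).mpr ⟨i.toNat, hk, by omega, rfl⟩
    have hfirst : pvFirst l v ≤ i := pv_head_le (pvOcc_pairwise l v) hiocc
    have := hBounds.2 v hvset
    rw [hgi]
    omega
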